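-- pv_equiv track=rewrite | github.com/sugijotaro/gift_exchange_order | gift_exchange_order.py | adjust_sequence
-- ===== SOURCE A (Python) =====
-- from math import gcd
--
-- def has_common_factor(x, y):
--     return any(gcd(x, y) % factor == 0 for factor in (2, 3, 5, 7))
--
-- def adjust_sequence(participants):
--     for i in range(len(participants) - 1):
--         if not has_common_factor(participants[i], participants[i + 1]):
--             for j in range(i + 2, len(participants)):
--                 if has_common_factor(participants[i], participants[j]):
--                     participants[i + 1], participants[j] = (
--                         participants[j],
--                         participants[i + 1],
--                     )
--                     break
--             else:
--                 return False
--     return has_common_factor(participants[-1], participants[0])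
-- ===== SOURCE B (Python) =====
-- # Different decomposition: A walks a fixed array with two nested index loops and swaps
-- # elements in place; B precomputes 4-bit small-prime masks once and then repeatedly
-- # SPLITS the shrinking remaining list at the first mask compatible with the previous
-- # one, rotating the head of the unmatched prefix to the prefix's end -- no indices
-- # into a fixed array, no in-place swaps (A mutates its argument in place; B does not:
-- # the equivalence is about the return value only).
--
-- def _mask(x):
--     m = 0
--     b = 1
--     for p in (2, 3, 5, 7):
--         if x % p == 0:
--             m |= b
--         b <<= 1
--     return m
--
-- def adjust_sequence(participants):
--     first = _mask(participants[0])
--     rest = [_mask(x) for x in participants[1:]]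
--     prev = first
--     while rest:
--         for k, m in enumerate(rest):
--             if prev & m:
--                 break
--         else:
--             return False
--         pre, post = rest[:k], rest[k + 1:]
--         rest = pre[1:] + pre[:1] + post
--         prev = m
--     return (prev & first) != 0
-- ===== Notes on version B (the rewrite author's own statement) =====
-- stated objective: alternative
-- what changed: B precomputes 4-bit small-prime masks once, then instead of A's two nested index loops swapping elements of a fixed array in place, it repeatedly splits the shrinking remaining list at the first compatible mask and rotates the head of the unmatched prefix to the prefix's end.
import Mathlib
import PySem

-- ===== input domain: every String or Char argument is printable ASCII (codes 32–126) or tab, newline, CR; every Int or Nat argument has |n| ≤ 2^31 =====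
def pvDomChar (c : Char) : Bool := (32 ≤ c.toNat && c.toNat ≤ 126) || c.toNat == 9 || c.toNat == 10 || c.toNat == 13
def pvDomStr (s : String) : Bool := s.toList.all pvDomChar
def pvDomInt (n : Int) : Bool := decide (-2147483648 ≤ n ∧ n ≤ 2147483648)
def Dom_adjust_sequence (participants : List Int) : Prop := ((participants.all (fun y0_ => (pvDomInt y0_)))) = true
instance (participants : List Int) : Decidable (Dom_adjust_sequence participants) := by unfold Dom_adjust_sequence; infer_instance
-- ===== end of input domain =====

-- B precomputes 4-bit small-prime masks once and then repeatedly splits the shrinking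
-- remaining mask list at the first compatible element, rotating the head of the unmatched
-- prefix to the prefix's end — instead of A's two nested index loops swapping elements of a
-- fixed array in place; equal return value (A mutates the caller's list in place, B does not
-- — the claim is about the return value only).

-- ===== PORT A =====
-- has_common_factor(x, y) = any(gcd(x, y) % factor == 0 for factor in (2, 3, 5, 7))
def hcfA (x y : Int) : Bool :=
  ([2, 3, 5, 7] : List Nat).any (fun f => Int.gcd x y % f == 0)

-- inner `for j in range(i+2, len(participants))` loop: the first j with a common factor
-- yields the swapped list, the for-else yields none (→ `return False`)
def innerA (ps : List Int) (i j : Nat) : Option (List Int) :=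
  if _h : j < ps.length then
    if hcfA (ps.getD i 0) (ps.getD j 0) then
      some ((ps.set (i + 1) (ps.getD j 0)).set j (ps.getD (i + 1) 0))
    else innerA ps i (j + 1)
  else none
termination_by ps.length - j

-- (cited by outerA's decreasing_by) the swap preserves the list length
lemma innerA_length (ps : List Int) (i j : Nat) (ps' : List Int)
    (h : innerA ps i j = some ps') : ps'.length = ps.length := by
  induction hn : ps.length - j using Nat.strong_induction_on generalizing j with
  | _ n ih =>
    rw [innerA] at h
    split at h
    · split at h
      · cases h; simp
      · exact ih (ps.length - (j + 1)) (by omega) (j + 1) h rfl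
    · cases h

-- outer `for i in range(len(participants) - 1)` loop
def outerA (ps : List Int) (i : Nat) : Bool :=
  if _h : i < ps.length - 1 then
    if hcfA (ps.getD i 0) (ps.getD (i + 1) 0) then outerA ps (i + 1)
    else
      match hm : innerA ps i (i + 2) with
      | some ps' => outerA ps' (i + 1)
      | none => false
  else hcfA (ps.getLastD 0) (ps.headD 0)
termination_by ps.length - i
decreasing_by
  · omega
  · have := innerA_length ps i (i + 2) ps' hm; omega

def adjust_sequence (participants : List Int) : Bool := outerA participants 0

-- ===== PORT B =====
-- _mask(x): m = 0; b = 1; for p in (2, 3, 5, 7): if x % p == 0: m |= b; b <<= 1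
def maskB (x : Int) : Nat :=
  (([2, 3, 5, 7] : List Int).foldl
    (fun (mb : Nat × Nat) p =>
      ((if PySem.Int.mod x p == 0 then mb.1 ||| mb.2 else mb.1), mb.2 <<< 1))
    (0, 1)).1

-- `for k, m in enumerate(rest): if prev & m: break / else: return False`, followed by the
-- slices rest[:k] and rest[k+1:], transcribed structurally: the unmatched prefix, the first
-- compatible mask and the suffix after it
def splitB (prev : Nat) (rest : List Nat) : Option (List Nat × Nat × List Nat) :=
  match rest with
  | [] => none
  | m :: t =>
    if prev &&& m != 0 then some ([], m, t)
    else (splitB prev t).map (fun amb => (m :: amb.1, amb.2.1, amb.2.2))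

-- (cited by loopB's decreasing_by) the split accounts for every element
lemma splitB_length (prev : Nat) (rest : List Nat) (a : List Nat) (m : Nat) (b : List Nat)
    (h : splitB prev rest = some (a, m, b)) : a.length + 1 + b.length = rest.length := by
  induction rest generalizing a m b with
  | nil => cases h
  | cons x t ih =>
    rw [splitB] at h
    split at h
    · cases h; simp only [List.length_nil, List.length_cons]; omega
    · cases ht : splitB prev t with
      | none => rw [ht] at h; cases h
      | some amb =>
        rw [ht] at h
        cases h
        have := ih amb.1 amb.2.1 amb.2.2 (by rw [ht])
        simp only [List.length_cons]
        omega

-- `while rest:` — split rest at the first compatible mask, rotate the head of the unmatched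
-- prefix to its end (rest = pre[1:] + pre[:1] + post), carry the matched mask as prev
def loopB (first prev : Nat) (rest : List Nat) : Bool :=
  match rest with
  | [] => prev &&& first != 0
  | x :: t =>
    match hs : splitB prev (x :: t) with
    | none => false
    | some (a, m, b) => loopB first m (a.drop 1 ++ a.take 1 ++ b)
termination_by rest.length
decreasing_by
  have h1 := splitB_length prev (x :: t) a m b hs
  have h4 : (a.drop 1 ++ a.take 1 ++ b).length ≤ a.length + b.length := by
    simp [List.length_append]; omega
  simp only [List.length_cons] at h1 ⊢
  omega

def adjust_sequence_alt (participants : List Int) : Bool :=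
  let first := maskB (participants.headD 0)
  loopB first first ((participants.drop 1).map maskB)

-- ===== PRECONDITION & SPEC =====
-- A reads the final element with a negative index and B reads the first element; both raise
-- IndexError on an empty list, which is the only excluded input.
def Pre_adjust_sequence (participants : List Int) : Prop := participants ≠ []
instance (participants : List Int) : Decidable (Pre_adjust_sequence participants) := by
  unfold Pre_adjust_sequence; infer_instance
def pvWitness_adjust_sequence : List Int := [6, 10, 15]

def Spec_adjust_sequence (participants : List Int) (out : Bool) : Prop := out = adjust_sequence_alt participants
instance (participants : List Int) (out : Bool) : Decidable (Spec_adjust_sequence participants out) := by unfold Spec_adjust_sequence; infer_instance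

-- ===== CLAIM (what is proved, stated in full; the proofs are below) =====
def Claim_equal_adjust_sequence : Prop := ∀ (participants : List Int), Dom_adjust_sequence participants → Pre_adjust_sequence participants → Spec_adjust_sequence participants (adjust_sequence participants)

-- ===== LEMMAS AND PROOFS =====

-- gcd(x, y) % p == 0 tests "p divides both x and y" (p one of 2, 3, 5, 7)
lemma gcdmod (x y : Int) (p : Nat) :
    (Int.gcd x y % p == 0) = (decide ((p : Int) ∣ x) && decide ((p : Int) ∣ y)) := by
  rw [Bool.eq_iff_iff]
  simp only [beq_iff_eq, ← Nat.dvd_iff_mod_eq_zero, Bool.and_eq_true, decide_eq_true_eq]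
  constructor
  · intro hd
    exact ⟨Int.ofNat_dvd_left.mpr (hd.trans (Nat.gcd_dvd_left _ _)),
           Int.ofNat_dvd_left.mpr (hd.trans (Nat.gcd_dvd_right _ _))⟩
  · rintro ⟨h1, h2⟩
    exact Nat.dvd_gcd (Int.ofNat_dvd_left.mp h1) (Int.ofNat_dvd_left.mp h2)

-- closed form of the mask fold
lemma maskB_eq (x : Int) :
    maskB x = (if (2:Int) ∣ x then 1 else 0) ||| (if (3:Int) ∣ x then 2 else 0)
      ||| (if (5:Int) ∣ x then 4 else 0) ||| (if (7:Int) ∣ x then 8 else 0) := by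
  simp only [maskB, List.foldl, beq_iff_eq, PySem.Int.mod_eq_zero_iff_dvd]
  by_cases h2 : (2:Int) ∣ x <;> by_cases h3 : (3:Int) ∣ x <;>
    by_cases h5 : (5:Int) ∣ x <;> by_cases h7 : (7:Int) ∣ x <;>
    simp [h2, h3, h5, h7]

-- the key bridge: A's gcd test equals B's bitwise mask test
lemma hcfA_eq_mask (x y : Int) : hcfA x y = (maskB x &&& maskB y != 0) := by
  have e : hcfA x y =
      ((decide ((2:Int) ∣ x) && decide ((2:Int) ∣ y)) ||
       (decide ((3:Int) ∣ x) && decide ((3:Int) ∣ y)) ||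
       (decide ((5:Int) ∣ x) && decide ((5:Int) ∣ y)) ||
       (decide ((7:Int) ∣ x) && decide ((7:Int) ∣ y))) := by
    simp only [hcfA, List.any_cons, List.any_nil, Bool.or_false,
      gcdmod x y 2, gcdmod x y 3, gcdmod x y 5, gcdmod x y 7]
    push_cast
    ac_rfl
  rw [e, maskB_eq x, maskB_eq y]
  by_cases h2x : (2:Int) ∣ x <;> by_cases h3x : (3:Int) ∣ x <;>
    by_cases h5x : (5:Int) ∣ x <;> by_cases h7x : (7:Int) ∣ x <;>
    by_cases h2y : (2:Int) ∣ y <;> by_cases h3y : (3:Int) ∣ y <;>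
    by_cases h5y : (5:Int) ∣ y <;> by_cases h7y : (7:Int) ∣ y <;>
    simp [h2x, h3x, h5x, h7x, h2y, h3y, h5y, h7y]

lemma getD_map (ps : List Int) (j : Nat) (h : j < ps.length) :
    (ps.map maskB).getD j 0 = maskB (ps.getD j 0) := by
  simp [List.getD_eq_getElem?_getD, h]

-- proof-only intermediate: A's loops replayed on the mask image of the array
-- (index-based, in-place swaps), used to bridge A's int array to B's splice recursion
def innerI (ms : List Nat) (h : Nat) (k : Nat) : Option Nat :=
  if _hk : k < ms.length then
    if h &&& ms.getD k 0 != 0 then some k else innerI ms h (k + 1)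
  else none
termination_by ms.length - k

def loopI (ms : List Nat) (first h : Nat) (i : Nat) : Bool :=
  if _hi : i < ms.length then
    if h &&& ms.getD i 0 != 0 then loopI ms first (ms.getD i 0) (i + 1)
    else
      match innerI ms h (i + 1) with
      | some k =>
        let ms' := (ms.set i (ms.getD k 0)).set k (ms.getD i 0)
        loopI ms' first (ms'.getD i 0) (i + 1)
      | none => false
  else (h &&& first != 0)
termination_by ms.length - i
decreasing_by
  · omega
  · simp; omega

-- A's inner search finds the first index innerI finds, and returns the swap
lemma innerAB (ps : List Int) (i j : Nat) :
    innerA ps i j = (innerI (ps.map maskB) (maskB (ps.getD i 0)) j).map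
      (fun k => (ps.set (i + 1) (ps.getD k 0)).set k (ps.getD (i + 1) 0)) := by
  induction hn : ps.length - j using Nat.strong_induction_on generalizing j with
  | _ n ih =>
  rw [innerA, innerI]
  by_cases hj : j < ps.length
  · rw [dif_pos hj, dif_pos (by simpa using hj)]
    rw [getD_map ps j hj, ← hcfA_eq_mask]
    by_cases hc : hcfA (ps.getD i 0) (ps.getD j 0) = true
    · rw [if_pos hc, if_pos hc]; rfl
    · rw [if_neg hc, if_neg hc]
      exact ih (ps.length - (j + 1)) (by omega) (j + 1) rfl
  · rw [dif_neg hj, dif_neg (by simpa using hj)]; rfl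

lemma innerI_some_bounds (ms : List Nat) (h j k : Nat)
    (hk : innerI ms h j = some k) : j ≤ k ∧ k < ms.length := by
  induction hn : ms.length - j using Nat.strong_induction_on generalizing j with
  | _ n ih =>
  rw [innerI] at hk
  split at hk
  · split at hk
    · cases hk; omega
    · have := ih (ms.length - (j + 1)) (by omega) (j + 1) hk rfl
      omega
  · cases hk

lemma headD_set (ps : List Int) (a : Nat) (v : Int) (ha : 1 ≤ a) :
    (ps.set a v).headD 0 = ps.headD 0 := by
  cases ps <;> cases a <;> simp_all

-- main invariant, stage 1: A's outer loop at i equals the index-based mask loop at i+1,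
-- with accumulator maskB ps[i]; neither loop ever writes position 0.
lemma mainAB : ∀ (n : Nat) (ps : List Int) (i : Nat), ps.length - i ≤ n → i < ps.length →
    outerA ps i = loopI (ps.map maskB) (maskB (ps.headD 0)) (maskB (ps.getD i 0)) (i + 1) := by
  intro n
  induction n with
  | zero => intro ps i h1 h2; omega
  | succ n ih =>
    intro ps i hfuel hi
    rw [outerA, loopI]
    by_cases hcase : i < ps.length - 1
    · rw [dif_pos hcase, dif_pos (by simp; omega)]
      rw [getD_map ps (i + 1) (by omega), ← hcfA_eq_mask]
      by_cases hc : hcfA (ps.getD i 0) (ps.getD (i + 1) 0) = true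
      · rw [if_pos hc, if_pos hc]
        exact ih ps (i + 1) (by omega) (by omega)
      · rw [if_neg hc, if_neg hc]
        rw [innerAB ps i (i + 2)]
        cases hB : innerI (ps.map maskB) (maskB (ps.getD i 0)) (i + 2) with
        | none => simp
        | some k =>
          obtain ⟨hk1, hk2⟩ := innerI_some_bounds _ _ _ _ hB
          have hklen : k < ps.length := by simpa using hk2
          simp only [Option.map_some]
          set ps' := (ps.set (i + 1) (ps.getD k 0)).set k (ps.getD (i + 1) 0) with hps'
          have hmap : ps'.map maskB
              = ((ps.map maskB).set (i + 1) ((ps.map maskB).getD k 0)).set k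
                  ((ps.map maskB).getD (i + 1) 0) := by
            rw [hps', List.map_set, List.map_set, getD_map ps k hklen,
              getD_map ps (i + 1) (by omega)]
          have hhead : ps'.headD 0 = ps.headD 0 := by
            rw [hps', headD_set _ _ _ (by omega), headD_set _ _ _ (by omega)]
          have hlen' : ps'.length = ps.length := by simp [hps']
          have := ih ps' (i + 1) (by omega) (by omega)
          rw [this, hhead, ← getD_map ps' (i + 1) (by omega), hmap,
            getD_map ps (i + 1) (by omega)]
    · rw [dif_neg hcase, dif_neg (by simp; omega)]
      rw [hcfA_eq_mask]
      rw [show ps.getLastD 0 = ps.getD (ps.length - 1) 0 by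
        simp [List.getLastD_eq_getLast?, List.getLast?_eq_getElem?, List.getD_eq_getElem?_getD]]
      rw [show ps.length - 1 = i by omega]

-- stage 2 bridge: the index-based inner search equals B's structural split of ms.drop j
lemma innerI_splitB (ms : List Nat) (h : Nat) : ∀ (j : Nat),
    splitB h (ms.drop j) = (innerI ms h j).map
      (fun k => ((ms.drop j).take (k - j), ms.getD k 0, ms.drop (k + 1))) := by
  intro j
  induction hn : ms.length - j using Nat.strong_induction_on generalizing j with
  | _ n ih =>
  by_cases hj : j < ms.length
  · rw [List.drop_eq_getElem_cons hj, splitB, innerI, dif_pos hj]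
    rw [List.getD_eq_getElem ms 0 hj]
    by_cases hm : h &&& ms[j] != 0
    · rw [if_pos hm, if_pos hm]
      simp [List.getD_eq_getElem?_getD, List.getElem?_eq_getElem hj]
    · rw [if_neg hm, if_neg hm]
      rw [ih (ms.length - (j + 1)) (by omega) (j + 1) rfl]
      cases hI : innerI ms h (j + 1) with
      | none => simp
      | some k =>
        obtain ⟨hk1, hk2⟩ := innerI_some_bounds _ _ _ _ hI
        simp only [Option.map_some]
        rw [show k - j = (k - (j + 1)) + 1 by omega, List.take_succ_cons]
  · rw [List.drop_eq_nil_of_le (by omega), innerI, dif_neg hj]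
    rfl

-- unfolding equations for loopB (well-founded recursion)
lemma loopB_nil (first prev : Nat) : loopB first prev [] = (prev &&& first != 0) := by
  rw [loopB.eq_def]

lemma loopB_cons (first prev x : Nat) (t : List Nat) :
    loopB first prev (x :: t)
      = match splitB prev (x :: t) with
        | none => false
        | some (a, m, b) => loopB first m (a.drop 1 ++ a.take 1 ++ b) := by
  rw [loopB.eq_def]
  split
  · simp_all
  · rename_i x' t' heq
    injection heq with h1 h2
    subst h1; subst h2
    split <;> rename_i hsx <;> simp [hsx]

-- stage 2: the index-based mask loop equals B's splice loop on the remaining suffix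
lemma loopIB : ∀ (n : Nat) (ms : List Nat) (first h i : Nat), ms.length - i ≤ n →
    loopI ms first h i = loopB first h (ms.drop i) := by
  intro n
  induction n with
  | zero =>
    intro ms first h i hf
    rw [loopI, dif_neg (by omega), List.drop_eq_nil_of_le (by omega), loopB_nil]
  | succ n ih =>
    intro ms first h i hf
    by_cases hi : i < ms.length
    · rw [loopI, dif_pos hi, List.getD_eq_getElem ms 0 hi]
      rw [List.drop_eq_getElem_cons hi, loopB_cons]
      by_cases hm : h &&& ms[i] != 0
      · rw [if_pos hm]
        rw [show splitB h (ms[i] :: ms.drop (i + 1)) = some ([], ms[i], ms.drop (i + 1)) from by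
          simp [splitB, hm]]
        simp only [List.drop_nil, List.take_nil, List.nil_append]
        rw [ih ms first ms[i] (i + 1) (by omega)]
      · rw [if_neg hm]
        rw [show splitB h (ms[i] :: ms.drop (i + 1))
            = (splitB h (ms.drop (i + 1))).map (fun amb => (ms[i] :: amb.1, amb.2.1, amb.2.2))
          from by simp [splitB, hm]]
        rw [innerI_splitB ms h (i + 1)]
        cases hI : innerI ms h (i + 1) with
        | none => simp
        | some k =>
          obtain ⟨hk1, hk2⟩ := innerI_some_bounds _ _ _ _ hI
          simp only [Option.map_some]
          set ms' := (ms.set i (ms.getD k 0)).set k ms[i] with hms'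
          have hlen' : ms'.length = ms.length := by simp [hms']
          have hprev : ms'.getD i 0 = ms.getD k 0 := by
            rw [hms', List.getD_eq_getElem?_getD, List.getElem?_set_ne (by omega),
              List.getElem?_set_self', List.getElem?_eq_getElem hi]
            simp
          have hdrop : ms'.drop (i + 1)
              = (ms.drop (i + 1)).take (k - (i + 1)) ++ ms[i] :: ms.drop (k + 1) := by
            rw [hms', List.drop_set, if_neg (by omega), List.drop_set, if_pos (by omega)]
            rw [List.set_eq_take_append_cons_drop,
              if_pos (by simp; omega : k - (i + 1) < (ms.drop (i + 1)).length)]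
            rw [List.drop_drop, show i + 1 + (k - (i + 1) + 1) = k + 1 by omega]
          rw [ih ms' first (ms'.getD i 0) (i + 1) (by omega), hprev, hdrop]
          simp
    · rw [loopI, dif_neg hi, List.drop_eq_nil_of_le (by omega), loopB_nil]

-- ===== VERDICT (by name: the statement is the Claim_ definition above) =====
theorem adjust_sequence_spec : Claim_equal_adjust_sequence := by
  intro ps _ hpre
  unfold Spec_adjust_sequence adjust_sequence adjust_sequence_alt
  have h0 : 0 < ps.length := List.length_pos_iff.mpr hpre
  have hg : ps.getD 0 0 = ps.headD 0 := by cases ps <;> simp_all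
  rw [mainAB ps.length ps 0 (by omega) h0, hg,
    loopIB ((ps.map maskB).length) (ps.map maskB) _ _ 1 (by omega)]
  rw [List.map_drop]
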